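-- pv_equiv track=rewrite | github.com/teismar/Advent-Of-Code-2023 | Day 10/e.py | count_enclosed_tiles
-- ===== SOURCE A (Python) =====
-- def flood_fill(grid, x, y, visited):
--     if x < 0 or x >= len(grid) or y < 0 or y >= len(grid[0]) or visited[x][y] or grid[x][y] != '.':
--         return
--     visited[x][y] = True
--     flood_fill(grid, x + 1, y, visited)
--     flood_fill(grid, x - 1, y, visited)
--     flood_fill(grid, x, y + 1, visited)
--     flood_fill(grid, x, y - 1, visited)
--
-- def count_enclosed_tiles(grid, loop):
--     visited = [[False for _ in row] for row in grid]
--     for x in range(len(grid)):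
--         flood_fill(grid, x, 0, visited)
--         flood_fill(grid, x, len(grid[0]) - 1, visited)
--     for y in range(len(grid[0])):
--         flood_fill(grid, 0, y, visited)
--         flood_fill(grid, len(grid) - 1, y, visited)
--
--     return sum(1 for x in range(len(grid)) for y in range(len(grid[0])) if grid[x][y] == '.' and not visited[x][y])
-- ===== SOURCE B (Python) =====
-- def count_enclosed_tiles(grid, loop):
--     h, w = len(grid), len(grid[0])
--     visited = [[False for _ in row] for row in grid]
--     seeds = []
--     for x in range(h):
--         seeds += [(x, 0), (x, w - 1)]
--     for y in range(w):
--         seeds += [(0, y), (h - 1, y)]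
--     stack = seeds[::-1]
--     while stack:
--         x, y = stack.pop()
--         if 0 <= x < h and 0 <= y < w and not visited[x][y] and grid[x][y] == '.':
--             visited[x][y] = True
--             stack.extend([(x, y - 1), (x, y + 1), (x - 1, y), (x + 1, y)])
--     return sum(1 for x in range(h) for y in range(w)
--                if grid[x][y] == '.' and not visited[x][y])
-- ===== Notes on version B (the rewrite author's own statement) =====
-- stated objective: idiomatic
-- what changed: The recursive flood fill is replaced by one iterative explicit-stack flood fill over a single worklist seeded with all border cells (no per-cell recursion).
import Mathlib
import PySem

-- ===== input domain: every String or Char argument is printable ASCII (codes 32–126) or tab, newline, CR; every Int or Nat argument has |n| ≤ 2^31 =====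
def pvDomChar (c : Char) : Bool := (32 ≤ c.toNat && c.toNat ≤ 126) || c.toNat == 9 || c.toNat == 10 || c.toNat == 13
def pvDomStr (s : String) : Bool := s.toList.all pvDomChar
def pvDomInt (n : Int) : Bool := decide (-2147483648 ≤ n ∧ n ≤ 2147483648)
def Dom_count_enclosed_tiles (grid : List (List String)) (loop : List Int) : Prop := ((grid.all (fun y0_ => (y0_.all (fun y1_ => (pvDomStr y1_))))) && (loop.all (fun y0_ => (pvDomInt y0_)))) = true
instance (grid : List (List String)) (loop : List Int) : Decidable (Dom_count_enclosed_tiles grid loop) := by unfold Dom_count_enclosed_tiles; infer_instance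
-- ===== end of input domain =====

-- B replaces A's recursive flood fill by one iterative explicit-stack flood fill whose
-- worklist is seeded with all border cells (objective: idiomatic, no per-cell recursion).

-- shared cell accessors (indexed cells are read only after the bounds checks both Pythons do)
def pvGrid (grid : List (List String)) (x y : Int) : String :=
  (grid.getD x.toNat []).getD y.toNat ""

def pvVis (v : List (List Bool)) (x y : Int) : Bool :=
  (v.getD x.toNat []).getD y.toNat false

-- visited[x][y] = True
def pvMark (v : List (List Bool)) (x y : Int) : List (List Bool) :=
  v.modify x.toNat (fun row => row.set y.toNat true)

-- number of still-unmarked entries (used only as fuel / termination measure)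
def pvFalse (v : List (List Bool)) : Nat :=
  (v.map (fun row => row.countP (fun b => !b))).sum

-- sum(1 for x in range(h) for y in range(w) if grid[x][y] == '.' and not visited[x][y])
-- (the identical final line of both Pythons)
def countDots (grid : List (List String)) (v : List (List Bool)) : Int :=
  (List.range grid.length).foldl (fun acc (x : Nat) =>
    (List.range grid.headI.length).foldl (fun acc2 (y : Nat) =>
      acc2 + (if pvGrid grid (x : Int) (y : Int) = "." ∧ pvVis v (x : Int) (y : Int) = false
              then 1 else 0)) acc) 0

-- ===== PORT A =====
-- A's recursive flood_fill; the fuel argument only makes it total (each recursive call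
-- first marks a cell, so fuel = pvFalse v + 1 always suffices — floodTop passes that).
def floodFill (grid : List (List String)) : Nat → Int → Int → List (List Bool) → List (List Bool)
  | 0, _, _, v => v
  | f + 1, x, y, v =>
    if x < 0 ∨ (grid.length : Int) ≤ x ∨ y < 0 ∨ (grid.headI.length : Int) ≤ y
        ∨ pvVis v x y = true ∨ pvGrid grid x y ≠ "." then v
    else
      let v1 := floodFill grid f (x + 1) y (pvMark v x y)
      let v2 := floodFill grid f (x - 1) y v1
      let v3 := floodFill grid f x (y + 1) v2
      floodFill grid f x (y - 1) v3

def floodTop (grid : List (List String)) (x y : Int) (v : List (List Bool)) : List (List Bool) :=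
  floodFill grid (pvFalse v + 1) x y v

def count_enclosed_tiles (grid : List (List String)) (loop : List Int) : Int :=
  let v0 := grid.map (fun row => row.map (fun _ => false))
  let v1 := (List.range grid.length).foldl (fun v (x : Nat) =>
      floodTop grid (x : Int) ((grid.headI.length : Int) - 1) (floodTop grid (x : Int) 0 v)) v0
  let v2 := (List.range grid.headI.length).foldl (fun v (y : Nat) =>
      floodTop grid ((grid.length : Int) - 1) (y : Int) (floodTop grid 0 (y : Int) v)) v1
  countDots grid v2

-- ===== PORT B =====
-- the next four lemmas are the termination measure for drainStack (cited by its decreasing_by):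
-- marking a genuinely unmarked in-range cell strictly decreases the number of unmarked cells
theorem pvFalse_cons (r : List Bool) (t : List (List Bool)) :
    pvFalse (r :: t) = r.countP (fun b => !b) + pvFalse t := by
  simp [pvFalse]

theorem countP_set_true_lt (row : List Bool) (j : Nat) (hj : j < row.length)
    (h : row.getD j false = false) :
    (row.set j true).countP (fun b => !b) < row.countP (fun b => !b) := by
  induction row generalizing j with
  | nil => simp at hj
  | cons a t ih =>
    cases j with
    | zero => simp_all
    | succ j =>
      simp only [List.set_cons_succ, List.countP_cons]
      have := ih j (by simpa using hj) (by simpa using h)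
      omega

theorem pvFalse_mark_lt' (v : List (List Bool)) (i j : Nat)
    (hx : i < v.length) (hy : j < (v.getD i []).length)
    (hf : (v.getD i []).getD j false = false) :
    pvFalse (v.modify i (fun row => row.set j true)) < pvFalse v := by
  induction v generalizing i with
  | nil => simp at hx
  | cons r t ih =>
    cases i with
    | zero =>
      simp only [List.modify_zero_cons] at *
      simp only [pvFalse_cons]
      have := countP_set_true_lt r j (by simpa using hy) (by simpa using hf)
      omega
    | succ i =>
      simp only [List.modify_succ_cons] at *
      simp only [pvFalse_cons]
      have := ih i (by simpa using hx) (by simpa using hy) (by simpa using hf)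
      omega

theorem pvFalse_mark_lt (v : List (List Bool)) (x y : Int)
    (hx : x.toNat < v.length) (hy : y.toNat < (v.getD x.toNat []).length)
    (hf : pvVis v x y = false) : pvFalse (pvMark v x y) < pvFalse v :=
  pvFalse_mark_lt' v x.toNat y.toNat hx hy hf

-- B's while-loop; the Lean list's head is the Python stack's top (Python pops from the
-- end and pushes [(x,y-1),(x,y+1),(x-1,y),(x+1,y)], so (x+1,y) is processed first).
-- The two `toNat < length` conjuncts are totality guards only: they always hold when
-- visited has grid's shape, which Python B (like A) presupposes.
def drainStack (grid : List (List String)) : List (Int × Int) → List (List Bool) → List (List Bool)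
  | [], v => v
  | (x, y) :: s, v =>
    if h : 0 ≤ x ∧ x < (grid.length : Int) ∧ 0 ≤ y ∧ y < (grid.headI.length : Int)
        ∧ x.toNat < v.length ∧ y.toNat < (v.getD x.toNat []).length
        ∧ pvVis v x y = false ∧ pvGrid grid x y = "." then
      drainStack grid ((x + 1, y) :: (x - 1, y) :: (x, y + 1) :: (x, y - 1) :: s) (pvMark v x y)
    else
      drainStack grid s v
  termination_by s v => (pvFalse v, s.length)
  decreasing_by
  · exact Prod.Lex.left _ _
      (pvFalse_mark_lt v x y h.2.2.2.2.1 h.2.2.2.2.2.1 h.2.2.2.2.2.2.1)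
  · exact Prod.Lex.right _ (by simp)

def count_enclosed_tiles_alt (grid : List (List String)) (loop : List Int) : Int :=
  let v0 := grid.map (fun row => row.map (fun _ => false))
  -- Python builds seeds and sets stack = seeds[::-1]; with Lean's head-as-top convention
  -- that stack is the seeds list itself
  let seeds := (List.range grid.length).flatMap
        (fun (x : Nat) => [((x : Int), (0 : Int)), ((x : Int), (grid.headI.length : Int) - 1)])
      ++ (List.range grid.headI.length).flatMap
        (fun (y : Nat) => [((0 : Int), (y : Int)), ((grid.length : Int) - 1, (y : Int))])
  countDots grid (drainStack grid seeds v0)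

-- ===== PRECONDITION & SPEC =====
-- Pre_ excludes exactly the inputs on which Python A raises IndexError: the empty grid
-- (grid[0]) and grids having a row shorter than row 0 (grid[x][y] in the final sum).
def Pre_count_enclosed_tiles (grid : List (List String)) (loop : List Int) : Prop :=
  grid ≠ [] ∧ ∀ row ∈ grid, grid.headI.length ≤ row.length

instance (grid : List (List String)) (loop : List Int) :
    Decidable (Pre_count_enclosed_tiles grid loop) := by
  unfold Pre_count_enclosed_tiles; infer_instance

def pvWitness_count_enclosed_tiles : List (List String) × List Int :=
  ([["#", "#", "#"], ["#", ".", "#"], [".", "#", "#"]], [])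

def Spec_count_enclosed_tiles (grid : List (List String)) (loop : List Int) (out : Int) : Prop :=
  out = count_enclosed_tiles_alt grid loop

instance (grid : List (List String)) (loop : List Int) (out : Int) :
    Decidable (Spec_count_enclosed_tiles grid loop out) := by
  unfold Spec_count_enclosed_tiles; infer_instance

-- ===== CLAIM (what is proved, stated in full; the proofs are below) =====
def Claim_equal_count_enclosed_tiles : Prop :=
  ∀ (grid : List (List String)) (loop : List Int), Dom_count_enclosed_tiles grid loop →
    Pre_count_enclosed_tiles grid loop →
    Spec_count_enclosed_tiles grid loop (count_enclosed_tiles grid loop)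

-- ===== LEMMAS AND PROOFS =====

-- invariant: visited keeps grid's row lengths
def VShape (grid : List (List String)) (v : List (List Bool)) : Prop :=
  v.map List.length = grid.map List.length

theorem map_length_modify (v : List (List Bool)) (i : Nat) (f : List Bool → List Bool)
    (hf : ∀ r, (f r).length = r.length) :
    (v.modify i f).map List.length = v.map List.length := by
  induction v generalizing i with
  | nil => simp
  | cons r t ih =>
    cases i with
    | zero => simp [hf]
    | succ i => simp [ih]

theorem vshape_mark (grid : List (List String)) (v : List (List Bool)) (x y : Int)
    (h : VShape grid v) : VShape grid (pvMark v x y) := by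
  unfold VShape pvMark
  rw [map_length_modify _ _ _ (fun r => List.length_set), h]

theorem countP_set_le (row : List Bool) (j : Nat) :
    (row.set j true).countP (fun b => !b) ≤ row.countP (fun b => !b) := by
  induction row generalizing j with
  | nil => simp
  | cons a t ih =>
    cases j with
    | zero => simp [List.countP_cons]
    | succ j =>
      simp only [List.set_cons_succ, List.countP_cons]
      have := ih j
      omega

theorem pvFalse_mark_le (v : List (List Bool)) (x y : Int) :
    pvFalse (pvMark v x y) ≤ pvFalse v := by
  unfold pvMark
  generalize x.toNat = i
  induction v generalizing i with
  | nil => simp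
  | cons r t ih =>
    cases i with
    | zero =>
      simp only [List.modify_zero_cons, pvFalse_cons]
      have := countP_set_le r y.toNat
      omega
    | succ i =>
      simp only [List.modify_succ_cons, pvFalse_cons]
      have := ih i
      omega

theorem pvFalse_flood_le (grid : List (List String)) (f : Nat) (x y : Int)
    (v : List (List Bool)) : pvFalse (floodFill grid f x y v) ≤ pvFalse v := by
  induction f generalizing x y v with
  | zero => simp [floodFill]
  | succ f ih =>
    rw [floodFill]
    split
    · exact le_refl _
    · calc pvFalse _ ≤ _ := ih _ _ _
        _ ≤ _ := ih _ _ _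
        _ ≤ _ := ih _ _ _
        _ ≤ _ := ih _ _ _
        _ ≤ _ := pvFalse_mark_le v x y

theorem vshape_flood (grid : List (List String)) (f : Nat) (x y : Int)
    (v : List (List Bool)) (h : VShape grid v) : VShape grid (floodFill grid f x y v) := by
  induction f generalizing x y v with
  | zero => simpa [floodFill]
  | succ f ih =>
    rw [floodFill]
    split
    · exact h
    · exact ih _ _ _ (ih _ _ _ (ih _ _ _ (ih _ _ _ (vshape_mark grid v x y h))))

theorem getD_map_length (l : List (List Bool)) (i : Nat) :
    (l.map List.length).getD i 0 = (l.getD i []).length := by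
  rcases Nat.lt_or_ge i l.length with h | h
  · rw [List.getD_eq_getElem _ _ (by simpa using h), List.getD_eq_getElem _ _ h]; simp
  · rw [List.getD_eq_default _ _ (by simpa using h), List.getD_eq_default _ _ h]; simp

theorem getD_map_length' (l : List (List String)) (i : Nat) :
    (l.map List.length).getD i 0 = (l.getD i []).length := by
  rcases Nat.lt_or_ge i l.length with h | h
  · rw [List.getD_eq_getElem _ _ (by simpa using h), List.getD_eq_getElem _ _ h]; simp
  · rw [List.getD_eq_default _ _ (by simpa using h), List.getD_eq_default _ _ h]; simp

-- under the shape invariant and Pre_, the in-bounds checks guarantee real list containment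
theorem vshape_bounds (grid : List (List String)) (v : List (List Bool)) (x y : Int)
    (hsh : VShape grid v) (hpre : ∀ row ∈ grid, grid.headI.length ≤ row.length)
    (hx0 : 0 ≤ x) (hx1 : x < (grid.length : Int))
    (hy0 : 0 ≤ y) (hy1 : y < (grid.headI.length : Int)) :
    x.toNat < v.length ∧ y.toNat < (v.getD x.toNat []).length := by
  have hlen : v.length = grid.length := by
    have := congrArg List.length hsh; simpa using this
  have hxN : x.toNat < v.length := by omega
  have hrow : (v.getD x.toNat []).length = (grid.getD x.toNat []).length := by
    rw [← getD_map_length, ← getD_map_length', hsh]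
  have hmem : grid.getD x.toNat [] ∈ grid := by
    rw [List.getD_eq_getElem _ _ (by omega : x.toNat < grid.length)]
    exact List.getElem_mem _
  have := hpre _ hmem
  refine ⟨hxN, ?_⟩
  omega

-- the simulation: popping (x,y) and draining equals draining after A's recursive flood at (x,y)
theorem drain_flood (grid : List (List String))
    (hpre : ∀ row ∈ grid, grid.headI.length ≤ row.length) :
    ∀ (n : Nat) (v : List (List Bool)), VShape grid v → pvFalse v = n →
      ∀ (x y : Int) (s : List (Int × Int)) (f : Nat), n < f →
        drainStack grid ((x, y) :: s) v = drainStack grid s (floodFill grid f x y v) := by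
  intro n
  induction n using Nat.strong_induction_on with
  | _ n ih =>
    intro v hsh hn x y s f hf
    obtain ⟨f, rfl⟩ : ∃ f', f = f' + 1 := ⟨f - 1, by omega⟩
    by_cases hskip : x < 0 ∨ (grid.length : Int) ≤ x ∨ y < 0 ∨ (grid.headI.length : Int) ≤ y
        ∨ pvVis v x y = true ∨ pvGrid grid x y ≠ "."
    · rw [floodFill, if_pos hskip, drainStack]
      rw [dif_neg]
      intro hB
      rcases hB with ⟨h1, h2, h3, h4, _, _, h7, h8⟩
      rcases hskip with h | h | h | h | h | h
      · omega
      · omega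
      · omega
      · omega
      · rw [h7] at h; exact Bool.false_ne_true h
      · exact h h8
    · push_neg at hskip
      obtain ⟨hx0, hx1, hy0, hy1, hvis, hdot⟩ := hskip
      have hvis' : pvVis v x y = false := by simpa using hvis
      obtain ⟨hbx, hby⟩ := vshape_bounds grid v x y hsh hpre hx0 hx1 hy0 hy1
      have hlt : pvFalse (pvMark v x y) < n := hn ▸ pvFalse_mark_lt v x y hbx hby hvis'
      have hshm : VShape grid (pvMark v x y) := vshape_mark grid v x y hsh
      rw [floodFill, if_neg (by push_neg; exact ⟨hx0, hx1, hy0, hy1, by simp [hvis'], hdot⟩)]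
      rw [drainStack, dif_pos ⟨hx0, hx1, hy0, hy1, hbx, hby, hvis', hdot⟩]
      set v0 := pvMark v x y with hv0
      have e1 := ih (pvFalse v0) hlt v0 hshm rfl (x+1) y ((x-1,y)::(x,y+1)::(x,y-1)::s) f (by omega)
      rw [e1]
      set v1 := floodFill grid f (x+1) y v0 with hv1
      have l1 : pvFalse v1 ≤ pvFalse v0 := pvFalse_flood_le _ _ _ _ _
      have s1 : VShape grid v1 := vshape_flood _ _ _ _ _ hshm
      have e2 := ih (pvFalse v1) (by omega) v1 s1 rfl (x-1) y ((x,y+1)::(x,y-1)::s) f (by omega)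
      rw [e2]
      set v2 := floodFill grid f (x-1) y v1 with hv2
      have l2 : pvFalse v2 ≤ pvFalse v1 := pvFalse_flood_le _ _ _ _ _
      have s2 : VShape grid v2 := vshape_flood _ _ _ _ _ s1
      have e3 := ih (pvFalse v2) (by omega) v2 s2 rfl x (y+1) ((x,y-1)::s) f (by omega)
      rw [e3]
      set v3 := floodFill grid f x (y+1) v2 with hv3
      have l3 : pvFalse v3 ≤ pvFalse v2 := pvFalse_flood_le _ _ _ _ _
      have s3 : VShape grid v3 := vshape_flood _ _ _ _ _ s2
      have e4 := ih (pvFalse v3) (by omega) v3 s3 rfl x (y-1) s f (by omega)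
      rw [e4]

-- draining the whole worklist = folding A's top-level flood over the seed list
theorem drain_seeds (grid : List (List String))
    (hpre : ∀ row ∈ grid, grid.headI.length ≤ row.length) :
    ∀ (seeds : List (Int × Int)) (v : List (List Bool)), VShape grid v →
      drainStack grid seeds v = seeds.foldl (fun v p => floodTop grid p.1 p.2 v) v := by
  intro seeds
  induction seeds with
  | nil => intro v _; rw [drainStack]; simp
  | cons p rest ih =>
    intro v hsh
    obtain ⟨x, y⟩ := p
    rw [drain_flood grid hpre (pvFalse v) v hsh rfl x y rest (pvFalse v + 1) (by omega)]
    rw [ih _ (vshape_flood _ _ _ _ _ hsh)]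
    rfl

theorem foldl_flatMap_pair {α : Type} (step : List (List Bool) → α → List (List Bool))
    (a b : Nat → α) :
    ∀ (l : List Nat) (v : List (List Bool)),
      (l.flatMap (fun x => [a x, b x])).foldl step v
        = l.foldl (fun v x => step (step v (a x)) (b x)) v := by
  intro l
  induction l with
  | nil => intro v; rfl
  | cons x t ih => intro v; simp only [List.flatMap_cons, List.cons_append, List.nil_append,
      List.foldl_cons, ih]

theorem vshape_init (grid : List (List String)) :
    VShape grid (grid.map (fun row => row.map (fun _ => false))) := by
  simp [VShape, List.map_map, Function.comp_def]

theorem main_eq (grid : List (List String)) (loop : List Int)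
    (hpre : ∀ row ∈ grid, grid.headI.length ≤ row.length) :
    count_enclosed_tiles grid loop = count_enclosed_tiles_alt grid loop := by
  unfold count_enclosed_tiles count_enclosed_tiles_alt
  dsimp only
  congr 1
  rw [drain_seeds grid hpre _ _ (vshape_init grid)]
  rw [List.foldl_append]
  rw [foldl_flatMap_pair, foldl_flatMap_pair]

-- ===== VERDICT (by name: the statement is the Claim_ definition above) =====
theorem count_enclosed_tiles_spec : Claim_equal_count_enclosed_tiles := by
  intro grid loop _ hpre
  unfold Spec_count_enclosed_tiles
  exact main_eq grid loop hpre.2
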